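-- pv_equiv track=rewrite | github.com/posl/comment_recommendation | script/mod_gen/3_time/zh/248_C/1.py | solve
-- ===== SOURCE A (Python) =====
-- def solve(n, m, k):
--     mod = 998244353
--     dp = [[[0 for _ in range(k+1)] for _ in range(m+1)] for _ in range(n+1)]
--     dp[0][0][0] = 1
--     for i in range(n):
--         for j in range(m+1):
--             for l in range(k+1):
--                 if l+j <= k:
--                     dp[i+1][j][l+j] = (dp[i+1][j][l+j] + dp[i][j][l]) % mod
--                 if j+1 <= m and l+j+1 <= k:
--                     dp[i+1][j+1][l+j+1] = (dp[i+1][j+1][l+j+1] + dp[i][j][l]) % mod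
--     return dp[n][m][k]
-- ===== SOURCE B (Python) =====
-- def solve(n, m, k):
--     # A counts length-n step sequences with m increments and accumulated weight k.
--     # Reading the increment positions t_1<...<t_m in {1..n}: each contributes
--     # n+1-t to the weight, so the answer is the number of m-element subsets of
--     # {1..n} summing to k.  B counts those directly with a subset-sum knapsack
--     # over the values 1..n (a different combinatorial object and recurrence).
--     mod = 998244353
--     f = [[1 if j == 0 and s == 0 else 0 for s in range(k + 1)]
--          for j in range(m + 1)]
--     for v in range(1, n + 1):
--         f = [[(f[j][s] + (f[j - 1][s - v] if j >= 1 and s >= v else 0)) % mod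
--               for s in range(k + 1)]
--              for j in range(m + 1)]
--     return f[m][k]
-- ===== Notes on version B (the rewrite author's own statement) =====
-- stated objective: alternative
-- what changed: Replaced the 3D weighted-step DP (pushing dp[i][j][l] along n steps) by a combinatorial reformulation: the answer equals the number of m-element subsets of {1..n} with sum k (each increment at step t contributes n+1-t), computed by a 2D subset-sum knapsack over the values 1..n.
import Mathlib
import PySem

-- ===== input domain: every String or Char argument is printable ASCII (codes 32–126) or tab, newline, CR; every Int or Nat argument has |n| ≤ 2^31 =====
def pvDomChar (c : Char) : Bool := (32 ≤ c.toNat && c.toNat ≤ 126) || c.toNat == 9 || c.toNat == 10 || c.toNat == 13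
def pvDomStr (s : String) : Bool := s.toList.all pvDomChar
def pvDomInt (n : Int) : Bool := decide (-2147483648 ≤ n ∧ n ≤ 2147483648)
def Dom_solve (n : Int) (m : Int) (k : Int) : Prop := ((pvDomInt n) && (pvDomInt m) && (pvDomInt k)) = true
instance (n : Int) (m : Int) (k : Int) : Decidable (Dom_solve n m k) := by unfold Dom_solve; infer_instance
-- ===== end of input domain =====

-- B reformulates A's 3D weighted-step DP combinatorially: the answer equals the
-- number of m-element subsets of {1..n} with sum k, which B counts with a 2D
-- subset-sum knapsack over the values 1..n (same return value).

-- ===== PORT A =====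
-- A's mutable 3D list dp (all zeros except the written cells) is represented as a
-- last-write-wins journal of cell writes: reading cell (i,j,l) returns the most
-- recent write to it, and 0 (the initial fill) if it was never written.  Under
-- Pre_solve every index A reads or writes is in range, so this is exact.
def pvGet3 (dp : List ((Int × Int × Int) × Int)) (i j l : Int) : Int :=
  ((dp.find? (fun e => e.1 == (i, j, l))).map (·.2)).getD 0

def pvUpd3 (dp : List ((Int × Int × Int) × Int)) (i j l v : Int) :
    List ((Int × Int × Int) × Int) :=
  ((i, j, l), v) :: dp

-- the body of A's innermost loop (i, j, l fixed): the two guarded pushes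
def pvBodyL (m k i j : Int) (dp : List ((Int × Int × Int) × Int)) (l : Int) :
    List ((Int × Int × Int) × Int) :=
  let dp := if l + j ≤ k then
      pvUpd3 dp (i+1) j (l+j)
        (PySem.Int.mod (pvGet3 dp (i+1) j (l+j) + pvGet3 dp i j l) 998244353)
    else dp
  if j + 1 ≤ m ∧ l + j + 1 ≤ k then
    pvUpd3 dp (i+1) (j+1) (l+j+1)
      (PySem.Int.mod (pvGet3 dp (i+1) (j+1) (l+j+1) + pvGet3 dp i j l) 998244353)
  else dp

def pvBodyJ (m k i : Int) (dp : List ((Int × Int × Int) × Int)) (j : Int) :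
    List ((Int × Int × Int) × Int) :=
  (PySem.List.pyRange 0 (k+1) 1).foldl (pvBodyL m k i j) dp

def pvBodyI (m k : Int) (dp : List ((Int × Int × Int) × Int)) (i : Int) :
    List ((Int × Int × Int) × Int) :=
  (PySem.List.pyRange 0 (m+1) 1).foldl (pvBodyJ m k i) dp

def solve (n : Int) (m : Int) (k : Int) : Int :=
  -- dp = all-zero table; dp[0][0][0] = 1
  let dp0 : List ((Int × Int × Int) × Int) := [((0, 0, 0), 1)]
  let dp := (PySem.List.pyRange 0 n 1).foldl (pvBodyI m k) dp0
  pvGet3 dp n m k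

-- ===== PORT B =====
-- f[j][s] read; exact under Pre_solve (every read B performs is in range)
def pvGet2 (cur : List (List Int)) (a b : Int) : Int :=
  PySem.List.pyGetD (PySem.List.pyGetD cur a []) b 0

-- one knapsack layer (value v offered): the list comprehension of Source B
def pvStepB (m k v : Int) (cur : List (List Int)) : List (List Int) :=
  (PySem.List.pyRange 0 (m+1) 1).map (fun j =>
    (PySem.List.pyRange 0 (k+1) 1).map (fun s =>
      PySem.Int.mod
        (pvGet2 cur j s + (if 1 ≤ j ∧ v ≤ s then pvGet2 cur (j-1) (s-v) else 0))
        998244353))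

def solve_alt (n : Int) (m : Int) (k : Int) : Int :=
  let init : List (List Int) := (PySem.List.pyRange 0 (m+1) 1).map (fun j =>
    (PySem.List.pyRange 0 (k+1) 1).map (fun s => if j = 0 ∧ s = 0 then 1 else 0))
  let fin := (PySem.List.pyRange 1 (n+1) 1).foldl (fun cur v => pvStepB m k v cur) init
  pvGet2 fin m k

-- ===== PRECONDITION & SPEC =====
-- A raises IndexError when n < 0, m < 0 or k < 0 (an empty dimension makes
-- dp[0][0][0] = 1 fail); Pre_solve excludes exactly those inputs.
def Pre_solve (n : Int) (m : Int) (k : Int) : Prop := 0 ≤ n ∧ 0 ≤ m ∧ 0 ≤ k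
instance (n : Int) (m : Int) (k : Int) : Decidable (Pre_solve n m k) := by
  unfold Pre_solve; infer_instance

def pvWitness_solve : Int × Int × Int := (3, 2, 4)

def Spec_solve (n : Int) (m : Int) (k : Int) (out : Int) : Prop := out = solve_alt n m k
instance (n : Int) (m : Int) (k : Int) (out : Int) : Decidable (Spec_solve n m k out) := by
  unfold Spec_solve; infer_instance

-- ===== CLAIM (what is proved, stated in full; the proofs are below) =====
def Claim_equal_solve : Prop := ∀ (n : Int) (m : Int) (k : Int), Dom_solve n m k →
  Pre_solve n m k → Spec_solve n m k (solve n m k)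

-- ===== LEMMAS AND PROOFS =====

-- A's pull recurrence with the modulus (the contents of A's table, see pvSt below)
def pvG : Nat → Int → Int → Int
  | 0, a, b => if a = 0 ∧ b = 0 then 1 else 0
  | s+1, a, b => if a ≤ b then
      PySem.Int.mod (pvG s a (b-a) + (if 1 ≤ a then pvG s (a-1) (b-a) else 0)) 998244353
    else 0

-- A's pull recurrence without the modulus (the exact counts)
def pvF : Nat → Int → Int → Int
  | 0, a, b => if a = 0 ∧ b = 0 then 1 else 0
  | i+1, a, b => if a ≤ b then
      pvF i a (b-a) + (if 1 ≤ a then pvF i (a-1) (b-a) else 0)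
    else 0

-- B's knapsack recurrence without the modulus: pvN v j s = number of j-element
-- subsets of {1..v} with sum s
def pvN : Nat → Int → Int → Int
  | 0, j, s => if j = 0 ∧ s = 0 then 1 else 0
  | v+1, j, s => pvN v j s +
      (if 1 ≤ j ∧ ((v : Int)+1) ≤ s then pvN v (j-1) (s-((v : Int)+1)) else 0)

-- B's knapsack recurrence with the modulus (what the port computes)
def pvNm : Nat → Int → Int → Int
  | 0, j, s => if j = 0 ∧ s = 0 then 1 else 0
  | v+1, j, s => PySem.Int.mod
      (pvNm v j s +
        (if 1 ≤ j ∧ ((v : Int)+1) ≤ s then pvNm v (j-1) (s-((v : Int)+1)) else 0))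
      998244353

lemma pvN_succ (v : Nat) (j s : Int) : pvN (v+1) j s = pvN v j s +
    (if 1 ≤ j ∧ ((v : Int)+1) ≤ s then pvN v (j-1) (s-((v : Int)+1)) else 0) := rfl

-- the key identity: the knapsack counts also satisfy A's pull recurrence
lemma pvN_pull : ∀ (v : Nat) (j s : Int),
    pvN (v+1) j s = if j ≤ s then
      pvN v j (s-j) + (if 1 ≤ j then pvN v (j-1) (s-j) else 0)
    else 0 := by
  intro v
  induction v with
  | zero =>
    intro j s
    simp only [pvN, Nat.cast_zero, zero_add]
    split_ifs <;> omega
  | succ v ih =>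
    intro j s
    rw [pvN_succ (v+1) j s, ih j s, ih (j-1) (s - (((v+1 : Nat) : Int) + 1))]
    rw [pvN_succ v j (s-j), pvN_succ v (j-1) (s-j)]
    push_cast
    have e1 : s - ((v : Int) + 1 + 1) - (j - 1) = s - j - ((v : Int) + 1) := by ring
    rw [e1]
    by_cases hjs : j ≤ s
    · by_cases h1 : 1 ≤ j
      · by_cases h2 : ((v : Int) + 1) ≤ s - j
        · rw [if_pos (show (1:Int) ≤ j ∧ (v : Int) + 1 + 1 ≤ s by constructor <;> omega),
              if_pos (show j - 1 ≤ s - ((v : Int) + 1 + 1) by omega),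
              if_pos hjs, if_pos hjs, if_pos h1, if_pos h1,
              if_pos (show (1:Int) ≤ j ∧ (v : Int) + 1 ≤ s - j from ⟨h1, h2⟩)]
          by_cases h3 : (1:Int) ≤ j - 1
          · rw [if_pos h3,
                if_pos (show (1:Int) ≤ j - 1 ∧ (v : Int) + 1 ≤ s - j from ⟨h3, h2⟩)]
            ring
          · rw [if_neg h3,
                if_neg (show ¬((1:Int) ≤ j - 1 ∧ (v : Int) + 1 ≤ s - j) by omega)]
            ring
        · rw [if_pos hjs, if_pos hjs, if_pos h1, if_pos h1,
              if_neg (show ¬((1:Int) ≤ j ∧ (v : Int) + 1 ≤ s - j) by omega),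
              if_neg (show ¬((1:Int) ≤ j - 1 ∧ (v : Int) + 1 ≤ s - j) by omega)]
          by_cases h4 : (1:Int) ≤ j ∧ (v : Int) + 1 + 1 ≤ s
          · rw [if_pos h4, if_neg (show ¬(j - 1 ≤ s - ((v : Int) + 1 + 1)) by omega)]
            ring
          · rw [if_neg h4]; ring
      · rw [if_pos hjs, if_pos hjs, if_neg h1, if_neg h1,
            if_neg (show ¬((1:Int) ≤ j ∧ (v : Int) + 1 + 1 ≤ s) by omega)]
        split_ifs with h5
        · exact absurd h5.1 h1
        · ring
    · rw [if_neg hjs, if_neg hjs]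
      by_cases h4 : (1:Int) ≤ j ∧ (v : Int) + 1 + 1 ≤ s
      · rw [if_pos h4, if_neg (show ¬(j - 1 ≤ s - ((v : Int) + 1 + 1)) by omega)]
        ring
      · rw [if_neg h4]; ring

lemma pvF_eq_pvN : ∀ (i : Nat) (a b : Int), pvF i a b = pvN i a b := by
  intro i
  induction i with
  | zero => intro a b; rfl
  | succ i ih =>
    intro a b
    rw [pvN_pull i a b]
    simp only [pvF]
    rw [ih a (b-a)]
    by_cases h : 1 ≤ a
    · rw [if_pos h, if_pos h, ih (a-1) (b-a)]
    · rw [if_neg h, if_neg h]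

lemma pvG_emod : ∀ (i : Nat) (a b : Int), pvG i a b = (pvF i a b) % 998244353 := by
  intro i
  induction i with
  | zero =>
    intro a b
    simp only [pvG, pvF]
    split_ifs <;> norm_num
  | succ i ih =>
    intro a b
    simp only [pvG, pvF]
    by_cases hab : a ≤ b
    · rw [if_pos hab, if_pos hab,
          PySem.Int.mod_eq_emod_of_pos (by norm_num), ih a (b-a)]
      by_cases h1 : 1 ≤ a
      · rw [if_pos h1, if_pos h1, ih (a-1) (b-a)]
        conv_rhs => rw [Int.add_emod]
      · rw [if_neg h1, if_neg h1, add_zero, add_zero,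
            Int.emod_emod_of_dvd _ dvd_rfl]
    · rw [if_neg hab, if_neg hab]; norm_num

lemma pvNm_emod : ∀ (v : Nat) (j s : Int), pvNm v j s = (pvN v j s) % 998244353 := by
  intro v
  induction v with
  | zero =>
    intro j s
    simp only [pvNm, pvN]
    split_ifs <;> norm_num
  | succ v ih =>
    intro j s
    simp only [pvNm, pvN]
    rw [PySem.Int.mod_eq_emod_of_pos (by norm_num), ih j s]
    by_cases hg : 1 ≤ j ∧ ((v : Int)+1) ≤ s
    · rw [if_pos hg, if_pos hg, ih (j-1) (s-((v : Int)+1))]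
      conv_rhs => rw [Int.add_emod]
    · rw [if_neg hg, if_neg hg, add_zero, add_zero,
          Int.emod_emod_of_dvd _ dvd_rfl]

-- ---- A-side: the journal computes pvG ----
lemma pvG_bound (s : Nat) (a b : Int) : 0 ≤ pvG s a b ∧ pvG s a b < 998244353 := by
  cases s with
  | zero =>
    simp only [pvG]; split_ifs <;> omega
  | succ s =>
    simp only [pvG]
    split_ifs
    all_goals try omega
    all_goals
      rw [PySem.Int.mod_eq_emod_of_pos (by norm_num)]
      exact ⟨Int.emod_nonneg _ (by norm_num), Int.emod_lt_of_pos _ (by norm_num)⟩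

lemma pvMod_small (x : Int) (h0 : 0 ≤ x) (h1 : x < 998244353) :
    PySem.Int.mod x 998244353 = x := by
  rw [PySem.Int.mod_eq_emod_of_pos (by norm_num)]
  exact Int.emod_eq_of_lt h0 h1

lemma pvGet3_upd (dp : List ((Int × Int × Int) × Int)) (i j l v i' j' l' : Int) :
    pvGet3 (pvUpd3 dp i j l v) i' j' l'
      = if i' = i ∧ j' = j ∧ l' = l then v else pvGet3 dp i' j' l' := by
  by_cases h : i' = i ∧ j' = j ∧ l' = l
  · obtain ⟨h1, h2, h3⟩ := h; subst h1; subst h2; subst h3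
    simp [pvGet3, pvUpd3]
  · rw [if_neg h]
    have hne : ((i, j, l) == (i', j', l')) = false := by
      simp only [beq_eq_false_iff_ne, ne_eq, Prod.mk.injEq, not_and]
      intro hc hc2 hc3; exact h ⟨hc.symm, hc2.symm, hc3.symm⟩
    simp [pvGet3, pvUpd3, hne]

-- the full A-table contents after t outer iterations, with the inner double loop
-- having processed all (j,l) with j < J, plus (J, l) for l < L
def pvSt (m k : Int) (t : Nat) (J L : Int) : Int → Int → Int → Int :=
  fun i' a b =>
    if 0 ≤ i' ∧ i' ≤ (t : Int) ∧ 0 ≤ a ∧ a ≤ m ∧ 0 ≤ b ∧ b ≤ k then pvG i'.toNat a b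
    else if i' = (t : Int) + 1 ∧ 0 ≤ a ∧ a ≤ m ∧ 0 ≤ b ∧ b ≤ k ∧ a ≤ b then
      (if a < J ∨ (a = J ∧ b - a < L) then
         PySem.Int.mod (pvG t a (b-a) + (if 1 ≤ a then pvG t (a-1) (b-a) else 0)) 998244353
       else if 1 ≤ a ∧ (a - 1 < J ∨ (a - 1 = J ∧ b - a < L)) then pvG t (a-1) (b-a)
       else 0)
    else 0

-- journal algebra: the cells pvBodyL writes, and the values it stores
lemma pvBodyL_get (m k i j l : Int) (dp : List ((Int × Int × Int) × Int))
    (i1 a1 b1 : Int) :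
    pvGet3 (pvBodyL m k i j dp l) i1 a1 b1 =
      if (j+1 ≤ m ∧ l+j+1 ≤ k) ∧ (i1 = i+1 ∧ a1 = j+1 ∧ b1 = l+j+1) then
        PySem.Int.mod (pvGet3 dp (i+1) (j+1) (l+j+1) + pvGet3 dp i j l) 998244353
      else if (l+j ≤ k) ∧ (i1 = i+1 ∧ a1 = j ∧ b1 = l+j) then
        PySem.Int.mod (pvGet3 dp (i+1) j (l+j) + pvGet3 dp i j l) 998244353
      else pvGet3 dp i1 a1 b1 := by
  unfold pvBodyL
  by_cases hg2 : j+1 ≤ m ∧ l+j+1 ≤ k <;> by_cases hg1 : l+j ≤ k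
  · simp only [if_pos hg1, if_pos hg2, pvGet3_upd]
    split_ifs <;> first | rfl | (exfalso; omega)
  · exact absurd (by omega : l + j ≤ k) hg1
  · simp only [if_pos hg1, if_neg hg2, pvGet3_upd]
    split_ifs <;> first | rfl | (exfalso; omega)
  · simp only [if_neg hg1, if_neg hg2]
    split_ifs <;> first | rfl | (exfalso; omega)

-- off the two written cells, advancing L by one does not change the state
lemma pvStL_off (m k : Int) (t : Nat) (J L : Int) (i' a b : Int)
    (h1 : ¬(i' = (t:Int)+1 ∧ a = J ∧ b = L + J ∧ L + J ≤ k))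
    (h2 : ¬(i' = (t:Int)+1 ∧ a = J+1 ∧ b = L+J+1 ∧ J+1 ≤ m ∧ L+J+1 ≤ k)) :
    pvSt m k t J L i' a b = pvSt m k t J (L+1) i' a b := by
  unfold pvSt
  split_ifs <;> first | rfl | (exfalso; omega)

-- one innermost-body application advances L by one
lemma pvStepL (m k : Int) (t : Nat) (J L : Int) (hm : 0 ≤ m) (hk : 0 ≤ k)
    (hJ0 : 0 ≤ J) (hJ : J ≤ m) (hL0 : 0 ≤ L) (hL : L ≤ k)
    (dp : List ((Int × Int × Int) × Int))
    (H : ∀ i' a b, pvGet3 dp i' a b = pvSt m k t J L i' a b) :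
    ∀ i' a b, pvGet3 (pvBodyL m k (t : Int) J dp L) i' a b = pvSt m k t J (L+1) i' a b := by
  intro i' a b
  have hr0 : pvGet3 dp (t:Int) J L = pvG t J L := by
    rw [H]; unfold pvSt
    rw [if_pos (by push_cast; omega)]
    rw [show ((t:Int)).toNat = t from by omega]
  rw [pvBodyL_get]
  by_cases h2 : (J+1 ≤ m ∧ L+J+1 ≤ k) ∧ (i' = (t:Int)+1 ∧ a = J+1 ∧ b = L+J+1)
  · rw [if_pos h2]
    obtain ⟨⟨hm2, hk2⟩, hi, ha, hb⟩ := h2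
    subst hi; subst ha; subst hb
    have e1 : pvGet3 dp ((t:Int)+1) (J+1) (L+J+1) = 0 := by
      rw [H]; unfold pvSt
      rw [if_neg (by push_cast; omega), if_pos (by push_cast; omega),
          if_neg (by omega), if_neg (by omega)]
    rw [e1, hr0, zero_add, pvMod_small _ (pvG_bound t J L).1 (pvG_bound t J L).2]
    unfold pvSt
    rw [if_neg (by push_cast; omega), if_pos (by push_cast; omega),
        if_neg (by omega), if_pos (by omega)]
    rw [show J+1-1 = J from by ring, show L+J+1-(J+1) = L from by ring]
  · rw [if_neg h2]
    by_cases h1 : (L+J ≤ k) ∧ (i' = (t:Int)+1 ∧ a = J ∧ b = L+J)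
    · rw [if_pos h1]
      obtain ⟨hk1, hi, ha, hb⟩ := h1
      subst hi; subst hb; rw [ha]
      have e2 : pvGet3 dp ((t:Int)+1) J (L+J) = (if 1 ≤ J then pvG t (J-1) L else 0) := by
        rw [H]; unfold pvSt
        rw [if_neg (by push_cast; omega), if_pos (by push_cast; omega), if_neg (by omega)]
        rw [show L + J - J = L from by ring]
        rw [if_congr (show (1 ≤ J ∧ (J - 1 < J ∨ (J - 1 = J ∧ L < L))) ↔ 1 ≤ J from by omega) rfl rfl]
      rw [e2, hr0]
      have hR : pvSt m k t J (L+1) ((t:Int)+1) J (L+J)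
          = PySem.Int.mod (pvG t J (L+J-J) + (if 1 ≤ J then pvG t (J-1) (L+J-J) else 0)) 998244353 := by
        unfold pvSt
        rw [if_neg (by push_cast; omega), if_pos (by push_cast; omega), if_pos (by omega)]
      rw [hR, show L + J - J = L from by ring]
      rw [Int.add_comm (if 1 ≤ J then pvG t (J-1) L else 0) (pvG t J L)]
    · rw [if_neg h1, H]
      exact pvStL_off m k t J L i' a b (by tauto) (by tauto)

-- the whole l-loop advances L from any point to k+1
lemma pvLoopL (m k : Int) (t : Nat) (J : Int) (hm : 0 ≤ m) (hk : 0 ≤ k)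
    (hJ0 : 0 ≤ J) (hJ : J ≤ m) :
    ∀ (L : Int), 0 ≤ L → L ≤ k + 1 →
    ∀ (dp : List ((Int × Int × Int) × Int)),
    (∀ i' a b, pvGet3 dp i' a b = pvSt m k t J L i' a b) →
    ∀ i' a b, pvGet3 ((PySem.List.pyRange L (k+1) 1).foldl (pvBodyL m k (t : Int) J) dp) i' a b
      = pvSt m k t J (k+1) i' a b := by
  suffices h : ∀ (fuel : Nat) (L : Int), (k+1-L).toNat = fuel → 0 ≤ L → L ≤ k+1 →
      ∀ (dp : List ((Int × Int × Int) × Int)),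
      (∀ i' a b, pvGet3 dp i' a b = pvSt m k t J L i' a b) →
      ∀ i' a b, pvGet3 ((PySem.List.pyRange L (k+1) 1).foldl (pvBodyL m k (t:Int) J) dp) i' a b
        = pvSt m k t J (k+1) i' a b by
    exact fun L h1 h2 => h _ L rfl h1 h2
  intro fuel
  induction fuel with
  | zero =>
    intro L hfuel hL0 hL dp H i' a b
    have hLk : L = k + 1 := by omega
    subst hLk
    rw [PySem.List.pyRange_one_eq_nil (le_refl _)]
    simpa using H i' a b
  | succ f ih =>
    intro L hfuel hL0 hL dp H i' a b
    have hLk : L < k+1 := by omega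
    rw [PySem.List.pyRange_one_cons hLk]
    simp only [List.foldl_cons]
    exact ih (L+1) (by omega) (by omega) (by omega) _
      (pvStepL m k t J L hm hk hJ0 hJ hL0 (by omega) dp H) i' a b

lemma pvAdvJ (m k : Int) (t : Nat) (J : Int) (hJ0 : 0 ≤ J) :
    pvSt m k t J (k+1) = pvSt m k t (J+1) 0 := by
  funext i' a b
  unfold pvSt
  split_ifs <;> first | rfl | (exfalso; omega)

lemma pvLoopJ (m k : Int) (t : Nat) (hm : 0 ≤ m) (hk : 0 ≤ k) :
    ∀ (J : Int), 0 ≤ J → J ≤ m + 1 →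
    ∀ (dp : List ((Int × Int × Int) × Int)),
    (∀ i' a b, pvGet3 dp i' a b = pvSt m k t J 0 i' a b) →
    ∀ i' a b, pvGet3 ((PySem.List.pyRange J (m+1) 1).foldl (pvBodyJ m k (t : Int)) dp) i' a b
      = pvSt m k t (m+1) 0 i' a b := by
  suffices h : ∀ (fuel : Nat) (J : Int), (m+1-J).toNat = fuel → 0 ≤ J → J ≤ m+1 →
      ∀ (dp : List ((Int × Int × Int) × Int)),
      (∀ i' a b, pvGet3 dp i' a b = pvSt m k t J 0 i' a b) →
      ∀ i' a b, pvGet3 ((PySem.List.pyRange J (m+1) 1).foldl (pvBodyJ m k (t:Int)) dp) i' a b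
        = pvSt m k t (m+1) 0 i' a b by
    exact fun J h1 h2 => h _ J rfl h1 h2
  intro fuel
  induction fuel with
  | zero =>
    intro J hfuel hJ0 hJ dp H i' a b
    have hJm : J = m + 1 := by omega
    subst hJm
    rw [PySem.List.pyRange_one_eq_nil (le_refl _)]
    simpa using H i' a b
  | succ f ih =>
    intro J hfuel hJ0 hJ dp H i' a b
    have hJm : J < m+1 := by omega
    rw [PySem.List.pyRange_one_cons hJm]
    simp only [List.foldl_cons]
    have hstep : ∀ i' a b, pvGet3 (pvBodyJ m k (t:Int) dp J) i' a b
        = pvSt m k t (J+1) 0 i' a b := by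
      intro i' a b
      rw [← pvAdvJ m k t J hJ0]
      exact pvLoopL m k t J hm hk hJ0 (by omega) 0 (by omega) (by omega) dp H i' a b
    exact ih (J+1) (by omega) (by omega) (by omega) _ hstep i' a b

lemma pvAdvT (m k : Int) (t : Nat) : pvSt m k t (m+1) 0 = pvSt m k (t+1) 0 0 := by
  funext i' a b
  unfold pvSt
  by_cases hi : i' = (t:Int) + 1
  · subst hi
    rw [if_neg (by push_cast; omega)]
    by_cases hcond : (0 ≤ a ∧ a ≤ m ∧ 0 ≤ b ∧ b ≤ k) ∧ a ≤ b
    · obtain ⟨⟨hb1, hb2, hb3, hb4⟩, hab⟩ := hcond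
      rw [if_pos (by push_cast; omega)]
      rw [if_pos (by omega)]
      conv_rhs => rw [if_pos (by push_cast; omega)]
      rw [show ((t:Int)+1).toNat = t+1 from by omega]
      simp only [pvG, if_pos hab]
    · rw [if_neg (by push_cast; omega)]
      by_cases hbox : 0 ≤ a ∧ a ≤ m ∧ 0 ≤ b ∧ b ≤ k
      · conv_rhs => rw [if_pos (by push_cast; omega)]
        rw [show ((t:Int)+1).toNat = t+1 from by omega]
        simp only [pvG]
        rw [if_neg (show ¬ a ≤ b from by tauto)]
      · conv_rhs => rw [if_neg (by push_cast; omega), if_neg (by push_cast; omega)]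
  · by_cases hC : 0 ≤ i' ∧ i' ≤ (t:Int) ∧ 0 ≤ a ∧ a ≤ m ∧ 0 ≤ b ∧ b ≤ k
    · rw [if_pos hC]
      conv_rhs => rw [if_pos (by push_cast; omega)]
    · rw [if_neg hC, if_neg (by push_cast; omega)]
      conv_rhs => rw [if_neg (by push_cast; omega)]
      split_ifs <;> first | rfl | (exfalso; push_cast at *; omega)

lemma pvLoopI (n m k : Int) (hm : 0 ≤ m) (hk : 0 ≤ k) :
    ∀ (t : Nat), (t : Int) ≤ n →
    ∀ (dp : List ((Int × Int × Int) × Int)),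
    (∀ i' a b, pvGet3 dp i' a b = pvSt m k t 0 0 i' a b) →
    ∀ i' a b, pvGet3 ((PySem.List.pyRange (t : Int) n 1).foldl (pvBodyI m k) dp) i' a b
      = pvSt m k n.toNat 0 0 i' a b := by
  suffices h : ∀ (fuel : Nat) (t : Nat), (n - (t:Int)).toNat = fuel → (t:Int) ≤ n →
      ∀ (dp : List ((Int × Int × Int) × Int)),
      (∀ i' a b, pvGet3 dp i' a b = pvSt m k t 0 0 i' a b) →
      ∀ i' a b, pvGet3 ((PySem.List.pyRange (t:Int) n 1).foldl (pvBodyI m k) dp) i' a b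
        = pvSt m k n.toNat 0 0 i' a b by
    exact fun t h1 => h _ t rfl h1
  intro fuel
  induction fuel with
  | zero =>
    intro t hfuel ht dp H i' a b
    have htn : (t:Int) = n := by omega
    rw [PySem.List.pyRange_one_eq_nil (by omega)]
    have : n.toNat = t := by omega
    rw [this]
    simpa using H i' a b
  | succ f ih =>
    intro t hfuel ht dp H i' a b
    have htn : (t:Int) < n := by omega
    rw [PySem.List.pyRange_one_cons htn]
    simp only [List.foldl_cons]
    have hstep : ∀ i' a b, pvGet3 (pvBodyI m k dp (t:Int)) i' a b
        = pvSt m k (t+1) 0 0 i' a b := by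
      intro i' a b
      rw [← pvAdvT m k t]
      exact pvLoopJ m k t hm hk 0 (by omega) (by omega) dp H i' a b
    have hcast : (t:Int) + 1 = ((t+1 : Nat) : Int) := by push_cast; ring
    rw [hcast]
    exact ih (t+1) (by omega) (by omega) _ hstep i' a b

lemma pvInit (m k : Int) (hm : 0 ≤ m) (hk : 0 ≤ k) :
    ∀ i' a b, pvGet3 [((0,0,0), (1:Int))] i' a b = pvSt m k 0 0 0 i' a b := by
  intro i' a b
  have hL : pvGet3 [((0,0,0), (1:Int))] i' a b
      = if i' = 0 ∧ a = 0 ∧ b = 0 then 1 else 0 := by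
    by_cases h : i' = 0 ∧ a = 0 ∧ b = 0
    · obtain ⟨h1, h2, h3⟩ := h; subst h1; subst h2; subst h3
      simp [pvGet3]
    · rw [if_neg h]
      have hne : (((0:Int), (0:Int), (0:Int)) == (i', a, b)) = false := by
        simp only [beq_eq_false_iff_ne, ne_eq, Prod.mk.injEq, not_and]
        intro hc hc2 hc3; exact h ⟨hc.symm, hc2.symm, hc3.symm⟩
      simp [pvGet3, hne]
  rw [hL]
  unfold pvSt
  by_cases hC : 0 ≤ i' ∧ i' ≤ ((0:Nat):Int) ∧ 0 ≤ a ∧ a ≤ m ∧ 0 ≤ b ∧ b ≤ k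
  · rw [if_pos hC]
    have hi : i' = 0 := by
      have h1 := hC.1; have h2 := hC.2.1; push_cast at h2; omega
    subst hi
    show _ = pvG ((0:Int).toNat) a b
    simp [pvG]
  · rw [if_neg hC]
    have hz : ¬(i' = 0 ∧ a = 0 ∧ b = 0) := by push_cast at hC; omega
    rw [if_neg hz]
    split_ifs <;> first | rfl | (exfalso; push_cast at *; omega)

lemma pvSolveA (n m k : Int) (hn : 0 ≤ n) (hm : 0 ≤ m) (hk : 0 ≤ k) :
    solve n m k = pvG n.toNat m k := by
  unfold solve
  have h := pvLoopI n m k hm hk 0 (by push_cast; omega) [((0,0,0), 1)]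
    (pvInit m k hm hk) n m k
  simp only [Nat.cast_zero] at h
  rw [h]
  unfold pvSt
  rw [if_pos (by push_cast; omega)]

-- ---- B side: the knapsack layers compute pvNm ----
lemma pvGet2_map (m k a b : Int) (f : Int → Int → Int)
    (ha0 : 0 ≤ a) (ha : a ≤ m) (hb0 : 0 ≤ b) (hb : b ≤ k) :
    pvGet2 ((PySem.List.pyRange 0 (m+1) 1).map (fun a =>
      (PySem.List.pyRange 0 (k+1) 1).map (fun b => f a b))) a b = f a b := by
  unfold pvGet2
  rw [PySem.List.pyGetD_map_pyRange_of_nonneg _ _ _ _ ha0 (by omega),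
      PySem.List.pyGetD_map_pyRange_of_nonneg _ _ _ _ hb0 (by omega)]

lemma pvStepB_eq (m k : Int) (v : Nat) (cur : List (List Int))
    (h : ∀ j s : Int, 0 ≤ j → j ≤ m → 0 ≤ s → s ≤ k → pvGet2 cur j s = pvNm v j s)
    (j s : Int) (hj0 : 0 ≤ j) (hj : j ≤ m) (hs0 : 0 ≤ s) (hs : s ≤ k) :
    pvGet2 (pvStepB m k ((v : Int)+1) cur) j s = pvNm (v+1) j s := by
  unfold pvStepB
  rw [pvGet2_map m k j s
    (fun j s => PySem.Int.mod
      (pvGet2 cur j s + (if 1 ≤ j ∧ ((v : Int)+1) ≤ s then pvGet2 cur (j-1) (s-((v : Int)+1)) else 0))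
      998244353) hj0 hj hs0 hs]
  show _ = pvNm (v+1) j s
  simp only [pvNm]
  rw [h j s hj0 hj hs0 hs]
  by_cases hg : 1 ≤ j ∧ ((v : Int)+1) ≤ s
  · rw [if_pos hg, if_pos hg,
        h (j-1) (s-((v : Int)+1)) (by omega) (by omega) (by omega) (by omega)]
  · rw [if_neg hg, if_neg hg]

lemma pvLoopB (n m k : Int) (hm : 0 ≤ m) (hk : 0 ≤ k) :
    ∀ (t : Nat), (t : Int) ≤ n →
    ∀ (cur : List (List Int)),
    (∀ j s : Int, 0 ≤ j → j ≤ m → 0 ≤ s → s ≤ k → pvGet2 cur j s = pvNm t j s) →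
    ∀ j s : Int, 0 ≤ j → j ≤ m → 0 ≤ s → s ≤ k →
    pvGet2 ((PySem.List.pyRange ((t : Int)+1) (n+1) 1).foldl (fun c v => pvStepB m k v c) cur) j s
      = pvNm n.toNat j s := by
  suffices h : ∀ (fuel : Nat) (t : Nat), (n - (t:Int)).toNat = fuel → (t:Int) ≤ n →
      ∀ (cur : List (List Int)),
      (∀ j s : Int, 0 ≤ j → j ≤ m → 0 ≤ s → s ≤ k → pvGet2 cur j s = pvNm t j s) →
      ∀ j s : Int, 0 ≤ j → j ≤ m → 0 ≤ s → s ≤ k →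
      pvGet2 ((PySem.List.pyRange ((t:Int)+1) (n+1) 1).foldl (fun c v => pvStepB m k v c) cur) j s
        = pvNm n.toNat j s by
    exact fun t h1 => h _ t rfl h1
  intro fuel
  induction fuel with
  | zero =>
    intro t hfuel ht cur H j s hj0 hj hs0 hs
    have htn : (t:Int) = n := by omega
    rw [PySem.List.pyRange_one_eq_nil (by omega)]
    have hnt : n.toNat = t := by omega
    rw [hnt]
    simpa using H j s hj0 hj hs0 hs
  | succ f ih =>
    intro t hfuel ht cur H j s hj0 hj hs0 hs
    have htn : (t:Int) + 1 < n + 1 := by omega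
    rw [PySem.List.pyRange_one_cons htn]
    simp only [List.foldl_cons]
    have hstep : ∀ j s : Int, 0 ≤ j → j ≤ m → 0 ≤ s → s ≤ k →
        pvGet2 (pvStepB m k ((t:Int)+1) cur) j s = pvNm (t+1) j s :=
      fun j s hj0 hj hs0 hs => pvStepB_eq m k t cur H j s hj0 hj hs0 hs
    have hcast : (t:Int) + 1 + 1 = ((t+1 : Nat) : Int) + 1 := by push_cast; ring
    rw [hcast]
    exact ih (t+1) (by omega) (by omega) _ hstep j s hj0 hj hs0 hs

lemma pvSolveB (n m k : Int) (hn : 0 ≤ n) (hm : 0 ≤ m) (hk : 0 ≤ k) :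
    solve_alt n m k = pvNm n.toNat m k := by
  unfold solve_alt
  have Hinit : ∀ j s : Int, 0 ≤ j → j ≤ m → 0 ≤ s → s ≤ k →
      pvGet2 ((PySem.List.pyRange 0 (m+1) 1).map (fun j =>
        (PySem.List.pyRange 0 (k+1) 1).map (fun s => if j = 0 ∧ s = 0 then (1:Int) else 0))) j s
        = pvNm 0 j s := by
    intro j s hj0 hj hs0 hs
    rw [pvGet2_map m k j s (fun j s => if j = 0 ∧ s = 0 then (1:Int) else 0) hj0 hj hs0 hs]
    rfl
  have h := pvLoopB n m k hm hk 0 (by push_cast; omega) _ Hinit m k hm (le_refl m) hk (le_refl k)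
  simp only [Nat.cast_zero, zero_add] at h
  exact h

-- ===== VERDICT (by name: the statement is the Claim_ definition above) =====
theorem solve_spec : Claim_equal_solve := by
  intro n m k _ hpre
  unfold Spec_solve
  obtain ⟨hn, hm, hk⟩ := hpre
  rw [pvSolveA n m k hn hm hk, pvSolveB n m k hn hm hk,
      pvG_emod, pvNm_emod, pvF_eq_pvN]
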